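-- pv_equiv track=rewrite | github.com/Ignisko/Leetcode_Python | 1679. Max Number of K-Sum Pairs.py | maxOperations
-- ===== SOURCE A (Python) =====
-- from typing import List
--
-- def maxOperations(nums: List[int], k: int) -> int:
--     nums.sort()
--     e, r = 0, len(nums) - 1
--     count = 0
--
--     while e < r:
--         cursum = nums[e] + nums[r]
--         if cursum == k:
--             count += 1
--             e += 1
--             r -= 1
--         elif cursum < k:
--             e += 1
--         else: r -= 1
--
--     return count
-- ===== SOURCE B (Python) =====
-- def maxOperations(nums, k):
--     cnt = {}
--     for x in nums:
--         cnt[x] = cnt.get(x, 0) + 1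
--     count = 0
--     for v, c in cnt.items():
--         w = k - v
--         if v < w:
--             count += min(c, cnt.get(w, 0))
--         elif v == w:
--             count += c // 2
--     return count
-- ===== Notes on version B (the rewrite author's own statement) =====
-- stated objective: alternative
-- what changed: A sorts the list and runs a two-pointer scan from both ends; B never sorts: it builds a hash-map of value frequencies and sums min(cnt[v], cnt[k-v]) over distinct values (cnt[v]//2 when 2v=k).
import Mathlib
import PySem

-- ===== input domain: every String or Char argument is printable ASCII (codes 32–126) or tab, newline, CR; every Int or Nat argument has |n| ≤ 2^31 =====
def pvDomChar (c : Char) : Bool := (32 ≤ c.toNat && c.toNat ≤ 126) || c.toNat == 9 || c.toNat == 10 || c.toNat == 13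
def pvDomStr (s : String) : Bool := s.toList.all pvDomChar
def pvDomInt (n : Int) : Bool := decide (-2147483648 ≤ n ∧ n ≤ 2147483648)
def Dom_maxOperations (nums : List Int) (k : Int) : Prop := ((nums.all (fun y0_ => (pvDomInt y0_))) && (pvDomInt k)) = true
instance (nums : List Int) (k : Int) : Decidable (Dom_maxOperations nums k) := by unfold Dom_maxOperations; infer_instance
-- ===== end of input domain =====

-- B replaces A's sort + two-pointer scan with a hash-map of value frequencies summed per distinct value.
-- Python A sorts nums IN PLACE (a caller-visible mutation; B does not); the equivalence proved here is about the return value only.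

-- ===== PORT A =====
-- the while loop of A; the indices e and r are only read while 0 ≤ e < r < nums.length, so `.getD 0` never fires
def pvLoopA (nums : List Int) (k : Int) (e r count : Int) : Int :=
  if e < r then
    let cursum := ((PySem.List.pyGet? nums e).getD 0) + ((PySem.List.pyGet? nums r).getD 0)
    if cursum = k then pvLoopA nums k (e + 1) (r - 1) (count + 1)
    else if cursum < k then pvLoopA nums k (e + 1) r count
    else pvLoopA nums k e (r - 1) count
  else count
termination_by (r - e).toNat
decreasing_by all_goals omega

def maxOperations (nums : List Int) (k : Int) : Int :=
  let s := PySem.List.sorted nums (fun x => x) false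
  pvLoopA s k 0 ((s.length : Int) - 1) 0

-- ===== PORT B =====
def maxOperations_alt (nums : List Int) (k : Int) : Int :=
  let cnt := nums.foldl (fun d x => d.insert x (d.getD x 0 + 1)) PySem.Dict.empty
  cnt.items.foldl (fun count vc =>
    let w := k - vc.1
    if vc.1 < w then count + min vc.2 (cnt.getD w 0)
    else if vc.1 = w then count + PySem.Int.floordiv vc.2 2
    else count) 0

-- ===== PRECONDITION & SPEC =====
def Spec_maxOperations (nums : List Int) (k : Int) (out : Int) : Prop := out = maxOperations_alt nums k
instance (nums : List Int) (k : Int) (out : Int) : Decidable (Spec_maxOperations nums k out) := by unfold Spec_maxOperations; infer_instance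

-- ===== CLAIM (what is proved, stated in full; the proofs are below) =====
def Claim_equal_maxOperations : Prop := ∀ (nums : List Int) (k : Int), Dom_maxOperations nums k → Spec_maxOperations nums k (maxOperations nums k)

-- ===== LEMMAS AND PROOFS =====

-- per-value contribution to the answer: pairs are counted once, at the smaller value of {v, k-v}
def pvTerm (l : List Int) (k v : Int) : Int :=
  if v < k - v then min (l.count v : Int) (l.count (k - v) : Int)
  else if v = k - v then PySem.Int.floordiv (l.count v : Int) 2
  else 0

-- the order-free pair count of the multiset of l
def pvPC (l : List Int) (k : Int) : Int := ∑ v ∈ l.toFinset, pvTerm l k v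

lemma pvTerm_of_not_mem (l : List Int) (k v : Int) (h : v ∉ l) : pvTerm l k v = 0 := by
  have hc : l.count v = 0 := List.count_eq_zero.2 h
  unfold pvTerm
  split_ifs with h1 h2
  · have : (0 : Int) ≤ (l.count (k - v) : Int) := by positivity
    omega
  · simp [hc]
  · rfl

lemma sum_map_pvTerm (l S : List Int) (k : Int) (hnd : S.Nodup)
    (hsub : ∀ v ∈ l, v ∈ S) : (S.map (pvTerm l k)).sum = pvPC l k := by
  rw [Finset.sum_list_map_count]
  unfold pvPC
  rw [Finset.sum_congr rfl (fun v hv => by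
    rw [List.count_eq_one_of_mem hnd (List.mem_toFinset.1 hv), one_smul])]
  exact (Finset.sum_subset (fun v hv => List.mem_toFinset.2 (hsub v (List.mem_toFinset.1 hv)))
    (fun v _ hv => pvTerm_of_not_mem l k v (by simpa using hv))).symm

lemma pvPC_congr_of_count_eq (l l' : List Int) (k : Int)
    (hsub : ∀ v ∈ l', v ∈ l)
    (hterm : ∀ v ∈ l, pvTerm l k v = pvTerm l' k v) : pvPC l k = pvPC l' k := by
  unfold pvPC
  rw [Finset.sum_congr rfl (fun v hv => hterm v (List.mem_toFinset.1 hv))]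
  exact (Finset.sum_subset (fun v hv => List.mem_toFinset.2 (hsub v (List.mem_toFinset.1 hv)))
    (fun v _ hv => pvTerm_of_not_mem l' k v (by simpa using hv))).symm

lemma pvPC_short (l : List Int) (k : Int) (h : l.length ≤ 1) : pvPC l k = 0 := by
  match l with
  | [] => simp [pvPC]
  | [x] =>
    simp only [pvPC, List.toFinset_cons, List.toFinset_nil, insert_empty_eq,
      Finset.sum_singleton]
    unfold pvTerm
    split_ifs with h1 h2
    · have : x ≠ k - x := by omega
      simp [this]
    · simp
    · rfl

lemma head_le_of_pairwise (l : List Int) (hne : l ≠ []) (hp : l.Pairwise (· ≤ ·)) :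
    ∀ v ∈ l, l.head hne ≤ v := by
  match l with
  | a :: t =>
    intro v hv
    rcases List.mem_cons.1 hv with rfl | hv
    · simp
    · exact (List.pairwise_cons.1 hp).1 v hv

lemma le_getLast_of_pairwise (l : List Int) (hne : l ≠ []) (hp : l.Pairwise (· ≤ ·)) :
    ∀ v ∈ l, v ≤ l.getLast hne := by
  induction l with
  | nil => simp
  | cons a t ih =>
    intro v hv
    rcases List.mem_cons.1 hv with rfl | hv
    · cases t with
      | nil => simp_all
      | cons b u =>
        have hb : b ≤ (b :: u).getLast (by simp) :=
          ih (by simp) (List.pairwise_cons.1 hp).2 b (by simp)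
        have : v ≤ b := (List.pairwise_cons.1 hp).1 b (by simp)
        simp only [List.getLast_cons (l := b :: u) (by simp)]
        omega
    · have hne' : t ≠ [] := by rintro rfl; simp at hv
      have := ih hne' (List.pairwise_cons.1 hp).2 v hv
      rwa [List.getLast_cons hne']

-- dropping the minimum element changes nothing when min + max < k
lemma pvPC_tail (l : List Int) (k : Int) (hne : l ≠ []) (hp : l.Pairwise (· ≤ ·))
    (hlt : l.head hne + l.getLast hne < k) : pvPC l k = pvPC l.tail k := by
  obtain ⟨a, t, rfl⟩ := List.exists_cons_of_ne_nil hne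
  simp only [List.head_cons] at hlt
  simp only [List.tail_cons]
  have hmax := le_getLast_of_pairwise _ hne hp
  have hmin := head_le_of_pairwise _ hne hp
  simp only [List.head_cons] at hmin
  set b := (a :: t).getLast hne with hb
  have hab : a ≤ b := hmax a (by simp)
  have hknm : (k - a) ∉ (a :: t) := fun hm => by have := hmax _ hm; omega
  apply pvPC_congr_of_count_eq
  · intro v hv; exact List.mem_cons_of_mem a hv
  · intro v hv
    by_cases hva : v = a
    · have hknm' : (k - v) ∉ (a :: t) := by rw [hva]; exact hknm
      have c1 : (a :: t).count (k - v) = 0 := List.count_eq_zero.2 hknm'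
      have c2 : t.count (k - v) = 0 :=
        List.count_eq_zero.2 (fun hm => hknm' (List.mem_cons_of_mem _ hm))
      unfold pvTerm
      rw [if_pos (by omega : v < k - v), c1, c2]
      have c3 : (a :: t).count v = t.count v + 1 := by
        rw [List.count_cons]; simp [hva]
      omega
    · have hvb := hmax v hv
      have c1 : (a :: t).count v = t.count v := by
        rw [List.count_cons]; simp [Ne.symm hva]
      have hka : k - v ≠ a := fun h => by
        have : v = k - a := by omega
        have := hmax v hv; omega
      have c2 : (a :: t).count (k - v) = t.count (k - v) := by
        rw [List.count_cons]; simp [Ne.symm hka]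
      unfold pvTerm
      rw [c1, c2]

-- dropping the maximum element changes nothing when min + max > k
lemma pvPC_dropLast (l : List Int) (k : Int) (hne : l ≠ []) (hp : l.Pairwise (· ≤ ·))
    (hgt : k < l.head hne + l.getLast hne) : pvPC l k = pvPC l.dropLast k := by
  have hmax := le_getLast_of_pairwise _ hne hp
  have hmin := head_le_of_pairwise _ hne hp
  set b := l.getLast hne with hb
  set a := l.head hne with ha
  have hab : a ≤ b := hmin b (List.getLast_mem hne)
  have hdec : l.dropLast ++ [b] = l := List.dropLast_append_getLast hne
  have hcnt : ∀ v, l.count v = l.dropLast.count v + if v = b then 1 else 0 := by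
    intro v
    conv_lhs => rw [← hdec]
    rw [List.count_append]
    simp [List.count_cons]
    split_ifs <;> omega
  apply pvPC_congr_of_count_eq
  · intro v hv
    rw [← hdec]; exact List.mem_append_left _ hv
  · intro v hv
    by_cases hvb : v = b
    · have h1 : ¬ (v < k - v) := by omega
      have h2 : v ≠ k - v := by omega
      unfold pvTerm
      rw [if_neg h1, if_neg h2, if_neg h1, if_neg h2]
    · have c1 : l.count v = l.dropLast.count v := by rw [hcnt]; simp [hvb]
      have hka : k - v ≠ b := fun h => by have := hmin v hv; omega
      have c2 : l.count (k - v) = l.dropLast.count (k - v) := by rw [hcnt]; simp [hka]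
      unfold pvTerm
      rw [c1, c2]

-- removing one matched pair (min + max = k) lowers the pair count by exactly one
lemma pvPC_pair (l : List Int) (k : Int) (hne : l ≠ []) (h2 : 2 ≤ l.length)
    (hp : l.Pairwise (· ≤ ·))
    (heq : l.head hne + l.getLast hne = k) : pvPC l k = pvPC l.tail.dropLast k + 1 := by
  have hmax := le_getLast_of_pairwise _ hne hp
  have hmin := head_le_of_pairwise _ hne hp
  obtain ⟨a, t, rfl⟩ := List.exists_cons_of_ne_nil hne
  have ht : t ≠ [] := by rintro rfl; simp at h2
  obtain ⟨m, b, rfl⟩ : ∃ m b, t = m ++ [b] := by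
    rcases List.eq_nil_or_concat t with rfl | ⟨m, b, h⟩
    · exact absurd rfl ht
    · exact ⟨m, b, by simpa using h⟩
  have hgl : (a :: (m ++ [b])).getLast hne = b := by
    rw [List.getLast_cons ht, List.getLast_concat]
  simp only [List.head_cons] at hmin heq
  rw [hgl] at hmax heq
  simp only [List.tail_cons, List.dropLast_concat]
  have hab : a ≤ b := hmin b (by simp)
  have hcnt : ∀ v, (a :: (m ++ [b])).count v =
      m.count v + (if v = a then 1 else 0) + (if v = b then 1 else 0) := by
    intro v
    rw [List.count_cons, List.count_append]
    simp only [List.count_cons, List.count_nil, beq_iff_eq]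
    split_ifs <;> omega
  have hmem_m : ∀ v ∈ m, v ∈ a :: (m ++ [b]) := by
    intro v hv
    exact List.mem_cons_of_mem _ (List.mem_append_left _ hv)
  by_cases hcase : a = b
  · -- all elements are equal and k = 2a
    have hall : ∀ v ∈ a :: (m ++ [b]), v = a := by
      intro v hv
      have := hmin v hv; have := hmax v hv; omega
    have hallm : ∀ v ∈ m, v = a := fun v hv => hall v (hmem_m v hv)
    have hka : a = k - a := by omega
    have hlenc : (a :: (m ++ [b])).count a = (a :: (m ++ [b])).length :=
      List.count_eq_length.2 (fun v hv => (hall v hv).symm ▸ rfl)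
    have htf : (a :: (m ++ [b])).toFinset = {a} :=
      Finset.eq_singleton_iff_unique_mem.2
        ⟨by simp, fun v hv => hall v (List.mem_toFinset.1 hv)⟩
    have hfd : ∀ n : Nat, PySem.Int.floordiv (n : Int) 2 = ((n / 2 : Nat) : Int) := by
      intro n; exact_mod_cast PySem.Int.floordiv_natCast n 2
    have hpcl : pvPC (a :: (m ++ [b])) k =
        PySem.Int.floordiv (((a :: (m ++ [b])).length : Nat) : Int) 2 := by
      rw [pvPC, htf, Finset.sum_singleton]
      unfold pvTerm
      rw [if_neg (show ¬ a < k - a by omega), if_pos (show a = k - a from hka), hlenc]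
    have hpcm : pvPC m k = PySem.Int.floordiv ((m.length : Nat) : Int) 2 := by
      by_cases hmne : m = []
      · subst hmne
        simp [pvPC]
      · have ham : a ∈ m := by
          obtain ⟨x, hx⟩ := List.exists_mem_of_ne_nil m hmne
          exact (hallm x hx) ▸ hx
        have htfm : m.toFinset = {a} := Finset.eq_singleton_iff_unique_mem.2
          ⟨List.mem_toFinset.2 ham, fun v hv => hallm v (List.mem_toFinset.1 hv)⟩
        have hlenm : m.count a = m.length :=
          List.count_eq_length.2 (fun v hv => (hallm v hv).symm ▸ rfl)
        rw [pvPC, htfm, Finset.sum_singleton]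
        unfold pvTerm
        rw [if_neg (show ¬ a < k - a by omega), if_pos (show a = k - a from hka), hlenm]
    have hlen : (a :: (m ++ [b])).length = m.length + 2 := by simp
    rw [hpcl, hpcm, hfd, hfd, hlen]
    have h22 : (m.length + 2) / 2 = m.length / 2 + 1 := by omega
    rw [h22]
    push_cast
    ring
  · -- a < b: the pair {a, b} loses one from each side, min drops by exactly one
    have hab' : a < b := lt_of_le_of_ne hab hcase
    have hterm : ∀ v ∈ (a :: (m ++ [b])).toFinset,
        pvTerm (a :: (m ++ [b])) k v = pvTerm m k v + (if v = a then 1 else 0) := by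
      intro v hv
      have hv' : v ∈ a :: (m ++ [b]) := List.mem_toFinset.1 hv
      have hminv := hmin v hv'
      have hmaxv := hmax v hv'
      by_cases hva : v = a
      · have c1 : (a :: (m ++ [b])).count v = m.count v + 1 := by
          rw [hcnt]; split_ifs <;> omega
        have c2 : (a :: (m ++ [b])).count (k - v) = m.count (k - v) + 1 := by
          rw [hcnt]; split_ifs <;> omega
        unfold pvTerm
        rw [if_pos (show v < k - v by omega), if_pos (show v < k - v by omega),
          if_pos hva, c1, c2]
        omega
      · by_cases hvb : v = b
        · have hn1 : ¬ (v < k - v) := by omega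
          have hn2 : v ≠ k - v := by omega
          unfold pvTerm
          rw [if_neg hn1, if_neg hn2, if_neg hn1, if_neg hn2, if_neg hva]
          omega
        · have c1 : (a :: (m ++ [b])).count v = m.count v := by
            rw [hcnt]; split_ifs <;> omega
          have c2 : (a :: (m ++ [b])).count (k - v) = m.count (k - v) := by
            rw [hcnt]; split_ifs <;> omega
          unfold pvTerm
          rw [c1, c2, if_neg hva, add_zero]
    rw [pvPC, Finset.sum_congr rfl hterm, Finset.sum_add_distrib]
    have hs1 : (∑ v ∈ (a :: (m ++ [b])).toFinset, if v = a then (1 : Int) else 0) = 1 := by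
      rw [Finset.sum_ite_eq' (a :: (m ++ [b])).toFinset a (fun _ => (1 : Int))]
      simp
    have hs2 : (∑ v ∈ (a :: (m ++ [b])).toFinset, pvTerm m k v) = pvPC m k := by
      rw [pvPC]
      exact (Finset.sum_subset
        (fun v hv => List.mem_toFinset.2 (hmem_m v (List.mem_toFinset.1 hv)))
        (fun v _ hv => pvTerm_of_not_mem m k v (by simpa using hv))).symm
    rw [hs1, hs2]

lemma pvTailTake (l : List Int) (n : Nat) : (l.take n).tail = l.tail.take (n - 1) := by
  induction l <;> cases n <;> simp

-- A's loop, started at (e, r), adds the pair count of the segment nums[e..r]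
lemma pvLoopA_pc (s : List Int) (k : Int) (hp : s.Pairwise (· ≤ ·))
    (e r c : Int) (he : 0 ≤ e) (hr : r < (s.length : Int)) :
    pvLoopA s k e r c = c + pvPC ((s.drop e.toNat).take (r + 1 - e).toNat) k := by
  rw [pvLoopA]
  by_cases her : e < r
  · rw [if_pos her]
    have hr0 : 0 ≤ r := by omega
    have hij : e.toNat < r.toNat := by omega
    have hjl : r.toNat < s.length := by omega
    have hil : e.toNat < s.length := by omega
    have hge : PySem.List.pyGet? s e = some (s[e.toNat]'hil) :=
      PySem.List.pyGet?_eq_some_getElem s he (by omega)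
    have hgr : PySem.List.pyGet? s r = some (s[r.toNat]'hjl) :=
      PySem.List.pyGet?_eq_some_getElem s hr0 hr
    set seg := (s.drop e.toNat).take (r + 1 - e).toNat with hseg
    have hlenseg : seg.length = r.toNat + 1 - e.toNat := by
      simp [hseg]; omega
    have hne : seg ≠ [] := by
      intro h; rw [h] at hlenseg; simp at hlenseg; omega
    have h2 : 2 ≤ seg.length := by omega
    have hhead : seg.head hne = s[e.toNat]'hil := by
      rw [List.head_eq_getElem]
      simp [hseg]
    have hlast : seg.getLast hne = s[r.toNat]'hjl := by
      rw [List.getLast_eq_getElem]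
      simp only [hseg, List.getElem_take, List.getElem_drop]
      congr 1
      rw [← hseg, hlenseg]
      omega
    have hsub : seg.Sublist s := (List.take_sublist _ _).trans (List.drop_sublist _ _)
    have hps : seg.Pairwise (· ≤ ·) := hp.sublist hsub
    have htail : seg.tail = (s.drop (e + 1).toNat).take (r + 1 - (e + 1)).toNat := by
      have he1 : (e + 1).toNat = e.toNat + 1 := by omega
      have hr1 : (r + 1 - (e + 1)).toNat = (r + 1 - e).toNat - 1 := by omega
      rw [hseg, pvTailTake, List.tail_drop, he1, hr1]
    have hdl : seg.dropLast = (s.drop e.toNat).take ((r - 1) + 1 - e).toNat := by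
      rw [List.dropLast_eq_take, hlenseg, hseg, List.take_take]
      congr 1
      omega
    have hmid : seg.tail.dropLast = (s.drop (e + 1).toNat).take ((r - 1) + 1 - (e + 1)).toNat := by
      rw [List.dropLast_eq_take, htail]
      have hlt : ((s.drop (e + 1).toNat).take (r + 1 - (e + 1)).toNat).length
          = r.toNat - e.toNat := by
        rw [List.length_take, List.length_drop]
        omega
      rw [hlt, List.take_take]
      congr 1
      omega
    rw [hge, hgr]
    simp only [Option.getD_some]
    split_ifs with hc1 hc2
    · rw [pvLoopA_pc s k hp (e + 1) (r - 1) (c + 1) (by omega) (by omega)]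
      rw [← hmid, pvPC_pair seg k hne h2 hps (by rw [hhead, hlast]; exact hc1)]
      ring
    · rw [pvLoopA_pc s k hp (e + 1) r c (by omega) (by omega)]
      rw [← htail, pvPC_tail seg k hne hps (by rw [hhead, hlast]; exact hc2)]
    · rw [pvLoopA_pc s k hp e (r - 1) c (by omega) (by omega)]
      rw [← hdl, pvPC_dropLast seg k hne hps (by rw [hhead, hlast]; omega)]
  · rw [if_neg her]
    have : ((s.drop e.toNat).take (r + 1 - e).toNat).length ≤ 1 := by
      simp
      omega
    rw [pvPC_short _ _ this, add_zero]
termination_by (r - e).toNat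
decreasing_by all_goals omega

lemma pvFoldlAdd (g : Int → Int) (xs : List Int) (a : Int) :
    xs.foldl (fun acc x => acc + g x) a = a + (xs.map g).sum := by
  induction xs generalizing a with
  | nil => simp
  | cons x t ih => simp [ih, add_assoc]

lemma maxOperations_alt_eq_pvPC (nums : List Int) (k : Int) :
    maxOperations_alt nums k = pvPC nums k := by
  unfold maxOperations_alt
  have hcnt : nums.foldl (fun d x => d.insert x (d.getD x 0 + 1)) PySem.Dict.empty
      = PySem.Dict.counter nums := PySem.Dict.foldl_insert_getD_add_one_eq_counter nums
  simp only [hcnt, PySem.Dict.items_counter, List.foldl_map]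
  have hbody : ∀ (acc : Int), ∀ v ∈ PySem.Set.ofList nums,
      (fun count (vc : Int × Int) =>
        if vc.1 < k - vc.1 then count + min vc.2 ((PySem.Dict.counter nums).getD (k - vc.1) 0)
        else if vc.1 = k - vc.1 then count + PySem.Int.floordiv vc.2 2
        else count) acc (v, (nums.count v : Int)) = acc + pvTerm nums k v := by
    intro acc v _
    simp only [PySem.Dict.getD_counter]
    unfold pvTerm
    split_ifs <;> omega
  rw [List.foldl_ext _ (fun (acc v : Int) => acc + pvTerm nums k v) 0 hbody]
  rw [pvFoldlAdd, zero_add]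
  exact sum_map_pvTerm nums _ k (PySem.Set.nodup_ofList nums)
    (fun v hv => (PySem.Set.mem_ofList nums v).2 hv)

lemma pvPC_perm (l l' : List Int) (k : Int) (h : l.Perm l') : pvPC l k = pvPC l' k := by
  have hterm : ∀ v, pvTerm l k v = pvTerm l' k v := by
    intro v
    unfold pvTerm
    rw [h.count_eq, h.count_eq]
  unfold pvPC
  rw [List.toFinset_eq_of_perm l l' h]
  exact Finset.sum_congr rfl (fun v _ => hterm v)

-- ===== VERDICT (by name: the statement is the Claim_ definition above) =====
theorem maxOperations_spec : Claim_equal_maxOperations := by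
  intro nums k _
  unfold Spec_maxOperations maxOperations
  set s := PySem.List.sorted nums (fun x => x) false with hs
  have hp : s.Pairwise (· ≤ ·) := by
    have := PySem.List.sorted_pairwise (xs := nums) (key := fun x => x)
    simpa [hs] using this
  rw [pvLoopA_pc s k hp 0 ((s.length : Int) - 1) 0 le_rfl (by omega), zero_add]
  have hseg : (s.drop (0 : Int).toNat).take (((s.length : Int) - 1) + 1 - 0).toNat = s := by
    simp
  rw [hseg]
  rw [pvPC_perm s nums k (PySem.List.sorted_perm nums (fun x => x) false)]
  exact (maxOperations_alt_eq_pvPC nums k).symm
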